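-- pv_equiv track=rewrite | github.com/bytedance/Protenix | protenix/data/tools/common.py | a3m_to_sto_list
-- ===== SOURCE A (Python) =====
-- from typing import Any, Iterable, List, Optional, Sequence, Tuple
--
-- def a3m_to_sto_list(a3m_seqs: List[str]) -> List[str]:
--     """
--     Convert a list of A3M sequences to Stockholm format aligned sequences.
--
--     Args:
--         a3m_seqs: List of sequences in A3M format.
--
--     Returns:
--         List of aligned sequences in Stockholm format.
--
--     Raises:
--         ValueError: If A3M rows have inconsistent lengths.
--     """
--     if not a3m_seqs:
--         return []
--     cursors = [list(s) for s in a3m_seqs]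
--     out = [""] * len(a3m_seqs)
--     while any(cursors):
--         if any(c and c[0].islower() for c in cursors):
--             for i, c in enumerate(cursors):
--                 if c and c[0].islower():
--                     out[i] += c.pop(0).upper()
--                 else:
--                     out[i] += "-"
--         else:
--             for i, c in enumerate(cursors):
--                 if not c:
--                     raise ValueError("Inconsistent row lengths in A3M")
--                 out[i] += c.pop(0)
--     return out
-- ===== SOURCE B (Python) =====
-- def a3m_to_sto_list(a3m_seqs):
--     """Row-wise conversion: tokenize each A3M row into match chars and
--     insertion runs, pad each insertion run to the per-gap maximum, join once
--     (instead of A's column-by-column scan over all rows)."""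
--     if not a3m_seqs:
--         return []
--     rows = []
--     for s in a3m_seqs:
--         gaps = [[]]
--         matches = []
--         for ch in s:
--             if ch.islower():
--                 gaps[-1].append(ch.upper())
--             else:
--                 matches.append(ch)
--                 gaps.append([])
--         rows.append((gaps, matches))
--     n_match = len(rows[0][1])
--     if any(len(matches) != n_match for _, matches in rows):
--         raise ValueError("Inconsistent row lengths in A3M")
--     n_gaps = len(rows[0][0])
--     maxg = [0] * n_gaps
--     for gaps, _ in rows:
--         maxg = [max(a, len(g)) for a, g in zip(maxg, gaps)]
--     out = []
--     for gaps, matches in rows: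
--         cols = []
--         for g, k, m in zip(gaps, maxg, matches):
--             cols.append("".join(g) + "-" * (k - len(g)) + m)
--         cols.append("".join(gaps[-1]) + "-" * (maxg[-1] - len(gaps[-1])))
--         out.append("".join(cols))
--     return out
-- ===== Notes on version B (the rewrite author's own statement) =====
-- stated objective: alternative
-- what changed: A builds the alignment column by column, scanning all rows per column and popping from the front of each row; B makes one pass per row, tokenizing match characters and insertion runs, padding each insertion run to the per-gap maximum, and joining once (and checks row consistency up front instead of discovering it mid-scan).
import Mathlib
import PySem

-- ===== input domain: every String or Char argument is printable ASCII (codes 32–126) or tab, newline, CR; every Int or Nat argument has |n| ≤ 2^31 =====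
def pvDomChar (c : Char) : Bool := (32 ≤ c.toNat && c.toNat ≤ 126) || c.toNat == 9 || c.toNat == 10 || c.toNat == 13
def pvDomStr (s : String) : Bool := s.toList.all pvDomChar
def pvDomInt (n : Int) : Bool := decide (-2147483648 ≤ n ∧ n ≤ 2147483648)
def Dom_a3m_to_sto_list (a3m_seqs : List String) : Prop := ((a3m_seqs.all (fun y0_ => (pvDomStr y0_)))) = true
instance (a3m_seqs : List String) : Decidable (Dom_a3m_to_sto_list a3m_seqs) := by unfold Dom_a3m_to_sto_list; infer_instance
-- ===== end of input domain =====

-- B replaces A's column-by-column loop over all rows by one pass per row: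
-- tokenize match chars / insertion runs, pad runs to per-gap maxima, join once.

-- str.islower() on a single char; exact on the printable-ASCII domain
def pvIsLower (c : Char) : Bool := decide ('a' ≤ c) && decide (c ≤ 'z')

-- ch.upper(); exact for ASCII lowercase letters (the only chars it is applied to)
def pvUpper (c : Char) : Char := Char.ofNat (c.toNat - 32)

-- ===== PORT A =====

-- `c and c[0].islower()`
def pvLowerHead : List Char → Bool
  | [] => false
  | c :: _ => pvIsLower c

-- effect of the lowercase branch on one cursor: pop(0) iff head is lowercase
def pvPopLower (c : List Char) : List Char := if pvLowerHead c then c.tail else c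

-- char appended to out[i] in the lowercase branch
def pvColChar : List Char → Char
  | [] => '-'
  | c :: _ => if pvIsLower c then pvUpper c else '-'

-- the `while any(cursors)` loop; fuel (total remaining chars + 1) is only a totality guard
def a3mLoop : Nat → List (List Char) → List (List Char) → List (List Char)
  | 0, _, out => out
  | fuel + 1, cursors, out =>
    if cursors.any (fun c => !c.isEmpty) then
      if cursors.any pvLowerHead then
        a3mLoop fuel (cursors.map pvPopLower)
          (List.zipWith (fun o c => o ++ [pvColChar c]) out cursors)
      else if cursors.any List.isEmpty then
        out  -- Python raises ValueError here; these inputs are excluded by Pre_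
      else
        a3mLoop fuel (cursors.map List.tail)
          (List.zipWith (fun o c => o ++ [c.headD '-']) out cursors)
    else out

def a3m_to_sto_list (a3m_seqs : List String) : List String :=
  if a3m_seqs.isEmpty then []
  else
    let cursors := a3m_seqs.map String.toList
    (a3mLoop ((cursors.map List.length).sum + 1) cursors
      (cursors.map (fun _ => []))).map (fun l => String.ofList l)

-- ===== PORT B =====

-- one step of Source B's tokenizing loop over the chars of a row
def pvTokStep (st : List (List Char) × List Char) (ch : Char) : List (List Char) × List Char :=
  if pvIsLower ch then (st.1.dropLast ++ [(st.1.getLast?.getD []) ++ [pvUpper ch]], st.2)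
  else (st.1 ++ [[]], st.2 ++ [ch])

-- (gaps, matches) of one row
def pvTok (s : List Char) : List (List Char) × List Char := s.foldl pvTokStep ([[]], [])

-- `[max(a, len(g)) for a, g in zip(maxg, gaps)]`
def pvMaxStep (mg : List Nat) (gaps : List (List Char)) : List Nat :=
  List.zipWith (fun a g => max a g.length) mg gaps

-- the cols loop plus the final gap, joined
def pvRenderRow (maxg : List Nat) (gaps : List (List Char)) (ms : List Char) : List Char :=
  (List.zipWith3 (fun g k m => g ++ List.replicate (k - g.length) '-' ++ [m]) gaps maxg ms).flatten
  ++ (gaps.getLast?.getD []) ++ List.replicate ((maxg.getLast?.getD 0) - (gaps.getLast?.getD []).length) '-'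

def a3m_to_sto_list_alt (a3m_seqs : List String) : List String :=
  if a3m_seqs.isEmpty then []
  else
    let rows := a3m_seqs.map (fun s => pvTok s.toList)
    let nMatch := (rows.headD ([[]], [])).2.length
    if rows.any (fun row => row.2.length != nMatch) then []  -- ValueError; excluded by Pre_
    else
      let nGaps := (rows.headD ([[]], [])).1.length
      let maxg := rows.foldl (fun mg row => pvMaxStep mg row.1) (List.replicate nGaps 0)
      rows.map (fun row => String.ofList (pvRenderRow maxg row.1 row.2))

-- ===== PRECONDITION & SPEC =====

-- number of non-lowercase (match-column) characters of a row
def pvCnt (s : String) : Nat := s.toList.countP (fun c => !pvIsLower c)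

-- Pre_ excludes exactly the inputs on which A raises ValueError:
-- rows with unequal numbers of non-lowercase characters (inconsistent A3M)
def Pre_a3m_to_sto_list (a3m_seqs : List String) : Prop :=
  ∀ s ∈ a3m_seqs, pvCnt s = pvCnt (a3m_seqs.headD "")
instance (a3m_seqs : List String) : Decidable (Pre_a3m_to_sto_list a3m_seqs) := by
  unfold Pre_a3m_to_sto_list; infer_instance

def pvWitness_a3m_to_sto_list : List String := ["AbC", "A-c"]

def Spec_a3m_to_sto_list (a3m_seqs : List String) (out : List String) : Prop :=
  out = a3m_to_sto_list_alt a3m_seqs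
instance (a3m_seqs : List String) (out : List String) : Decidable (Spec_a3m_to_sto_list a3m_seqs out) := by
  unfold Spec_a3m_to_sto_list; infer_instance

-- ===== CLAIM (what is proved, stated in full; the proofs are below) =====
def Claim_equal_a3m_to_sto_list : Prop := ∀ (a3m_seqs : List String), Dom_a3m_to_sto_list a3m_seqs → Pre_a3m_to_sto_list a3m_seqs → Spec_a3m_to_sto_list a3m_seqs (a3m_to_sto_list a3m_seqs)

-- ===== LEMMAS AND PROOFS =====

-- recursive characterization of pvTok (proof-side only)
def tokR : List Char → List (List Char) × List Char
  | [] => ([[]], [])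
  | c :: cs =>
    let t := tokR cs
    if pvIsLower c then ((pvUpper c :: t.1.headD []) :: t.1.tail, t.2)
    else ([] :: t.1, c :: t.2)

theorem tokR_ne_nil (cs : List Char) : (tokR cs).1 ≠ [] := by
  cases cs with
  | nil => simp [tokR]
  | cons c cs => simp only [tokR]; split <;> simp

def mapHd (f : List Char → List Char) : List (List Char) → List (List Char)
  | [] => []
  | h :: t => f h :: t

theorem tok_acc (cs : List Char) : ∀ (G : List (List Char)) (g M : List Char),
    List.foldl pvTokStep (G ++ [g], M) cs
      = (G ++ mapHd (g ++ ·) (tokR cs).1, M ++ (tokR cs).2) := by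
  induction cs with
  | nil => intro G g M; simp [tokR, mapHd]
  | cons c cs ih =>
    intro G g M
    by_cases h : pvIsLower c = true
    · have hstep : pvTokStep (G ++ [g], M) c = (G ++ [g ++ [pvUpper c]], M) := by
        simp [pvTokStep, h]
      rw [List.foldl_cons, hstep, ih]
      obtain ⟨th, tt, ht⟩ : ∃ th tt, (tokR cs).1 = th :: tt := by
        rcases hne : (tokR cs).1 with _ | ⟨th, tt⟩
        · exact absurd hne (tokR_ne_nil cs)
        · exact ⟨th, tt, rfl⟩
      simp [tokR, h, ht, mapHd]
    · have hstep : pvTokStep (G ++ [g], M) c = ((G ++ [g]) ++ [[]], M ++ [c]) := by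
        simp [pvTokStep, h]
      rw [List.foldl_cons, hstep, ih]
      obtain ⟨th, tt, ht⟩ : ∃ th tt, (tokR cs).1 = th :: tt := by
        rcases hne : (tokR cs).1 with _ | ⟨th, tt⟩
        · exact absurd hne (tokR_ne_nil cs)
        · exact ⟨th, tt, rfl⟩
      simp [tokR, h, ht, mapHd]

theorem tok_eq (s : List Char) : pvTok s = tokR s := by
  have h := tok_acc s [] [] []
  simp only [List.nil_append] at h
  rw [pvTok, h]
  obtain ⟨th, tt, ht⟩ : ∃ th tt, (tokR s).1 = th :: tt := by
    rcases hne : (tokR s).1 with _ | ⟨th, tt⟩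
    · exact absurd hne (tokR_ne_nil s)
    · exact ⟨th, tt, rfl⟩
  rw [ht, mapHd]
  simp [← ht]

theorem tokR_len (cs : List Char) : (tokR cs).1.length = (tokR cs).2.length + 1 := by
  induction cs with
  | nil => simp [tokR]
  | cons c cs ih =>
    obtain ⟨th, tt, ht⟩ : ∃ th tt, (tokR cs).1 = th :: tt := by
      rcases hne : (tokR cs).1 with _ | ⟨th, tt⟩
      · exact absurd hne (tokR_ne_nil cs)
      · exact ⟨th, tt, rfl⟩
    simp only [tokR]
    split <;> simp_all

theorem tokR_cnt (cs : List Char) :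
    (tokR cs).2.length = cs.countP (fun c => !pvIsLower c) := by
  induction cs with
  | nil => simp [tokR]
  | cons c cs ih =>
    simp only [tokR, List.countP_cons]
    split <;> simp_all

theorem tokR_dest (cs : List Char) :
    (tokR cs).1 = ((tokR cs).1.headD []) :: (tokR cs).1.tail := by
  rcases hne : (tokR cs).1 with _ | ⟨th, tt⟩
  · exact absurd hne (tokR_ne_nil cs)
  · simp

theorem tokR_popLower (cs : List Char) :
    tokR (pvPopLower cs)
      = (((tokR cs).1.headD []).tail :: (tokR cs).1.tail, (tokR cs).2) := by
  cases cs with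
  | nil => simp [pvPopLower, pvLowerHead, tokR]
  | cons c cs =>
    by_cases h : pvIsLower c = true
    · have hp : pvPopLower (c :: cs) = cs := by simp [pvPopLower, pvLowerHead, h]
      rw [hp]
      rw [show tokR (c :: cs) = ((pvUpper c :: (tokR cs).1.headD []) :: (tokR cs).1.tail, (tokR cs).2) from by simp [tokR, h]]
      simp only [List.headD_cons, List.tail_cons]
      exact Prod.ext (tokR_dest cs) rfl
    · have hp : pvPopLower (c :: cs) = c :: cs := by simp [pvPopLower, pvLowerHead, h]
      rw [hp]
      rw [show tokR (c :: cs) = ([] :: (tokR cs).1, c :: (tokR cs).2) from by simp [tokR, h]]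
      simp

theorem gap0_of_lower (cs : List Char) (h : pvLowerHead cs = true) :
    (tokR cs).1.headD [] = pvColChar cs :: ((tokR cs).1.headD []).tail := by
  cases cs with
  | nil => simp [pvLowerHead] at h
  | cons c cs =>
    simp only [pvLowerHead] at h
    simp [tokR, pvColChar, h]

theorem gap0_of_not_lower (cs : List Char) (h : pvLowerHead cs = false) :
    (tokR cs).1.headD [] = [] := by
  cases cs with
  | nil => simp [tokR]
  | cons c cs =>
    simp only [pvLowerHead] at h
    simp [tokR, h]

theorem colChar_of_not_lower (cs : List Char) (h : pvLowerHead cs = false) :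
    pvColChar cs = '-' := by
  cases cs with
  | nil => rfl
  | cons c cs =>
    simp only [pvLowerHead] at h
    simp [pvColChar, h]

theorem cnt_popLower (cs : List Char) :
    (pvPopLower cs).countP (fun c => !pvIsLower c) = cs.countP (fun c => !pvIsLower c) := by
  cases cs with
  | nil => rfl
  | cons c cs =>
    by_cases h : pvIsLower c = true
    · simp [pvPopLower, pvLowerHead, h]
    · simp [pvPopLower, pvLowerHead, h]

-- pointwise maximum of the rows' gap-length lists
def maxP : List (List Nat) → List Nat
  | [] => []
  | l :: ls => ls.foldl (fun acc x => List.zipWith max acc x) l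

theorem maxP_decomp (a : Nat) (as : List Nat) (ls : List (List Nat))
    (h : ∀ l ∈ ls, l ≠ []) :
    maxP ((a :: as) :: ls)
      = (ls.foldl (fun x l => max x (l.headD 0)) a) :: maxP (as :: ls.map List.tail) := by
  induction ls generalizing a as with
  | nil => simp [maxP]
  | cons l ls ih =>
    obtain ⟨b, bs, rfl⟩ : ∃ b bs, l = b :: bs := by
      rcases l with _ | ⟨b, bs⟩
      · exact absurd rfl (h _ (by simp))
      · exact ⟨b, bs, rfl⟩
    have h' : ∀ l ∈ ls, l ≠ [] := fun l hl => h l (by simp [hl])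
    have e1 : maxP ((a :: as) :: (b :: bs) :: ls)
        = maxP ((max a b :: List.zipWith max as bs) :: ls) := by
      simp [maxP]
    rw [e1, ih (max a b) (List.zipWith max as bs) h']
    simp only [List.foldl_cons, List.headD_cons, List.map_cons, List.tail_cons,
      List.cons.injEq]
    refine ⟨trivial, ?_⟩
    simp [maxP]

theorem foldl_max_sub {α : Type} (rest : List α) (f : α → Nat) :
    ∀ a : Nat, rest.foldl (fun x r => max x (f r - 1)) (a - 1)
      = rest.foldl (fun x r => max x (f r)) a - 1 := by
  induction rest with
  | nil => intro a; simp
  | cons r rest ih =>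
    intro a
    simp only [List.foldl_cons]
    rw [show max (a - 1) (f r - 1) = max a (f r) - 1 by omega]
    exact ih (max a (f r))

theorem foldl_max_zero {α : Type} (rest : List α) (f : α → Nat)
    (h : ∀ r ∈ rest, f r = 0) :
    rest.foldl (fun x r => max x (f r)) 0 = 0 := by
  induction rest with
  | nil => rfl
  | cons r rest ih =>
    simp only [List.foldl_cons, h r (by simp)]
    exact ih (fun q hq => h q (by simp [hq]))

-- row rendering, structurally (proof-side twin of pvRenderRow)
def renderR : List Nat → List (List Char) → List Char → List Char
  | K :: Kt, g :: gt, m :: mt =>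
      g ++ List.replicate (K - g.length) '-' ++ (m :: renderR Kt gt mt)
  | K :: _, g :: _, [] => g ++ List.replicate (K - g.length) '-'
  | _, _, _ => []

theorem renderRow_eq_renderR (maxg : List Nat) (gaps : List (List Char)) (ms : List Char)
    (h1 : gaps.length = ms.length + 1) (h2 : maxg.length = gaps.length) :
    pvRenderRow maxg gaps ms = renderR maxg gaps ms := by
  induction ms generalizing gaps maxg with
  | nil =>
    obtain ⟨g, rfl⟩ : ∃ g, gaps = [g] := by
      cases gaps with
      | nil => simp at h1
      | cons g gt =>
        cases gt with
        | nil => exact ⟨g, rfl⟩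
        | cons _ _ => exfalso; simp only [List.length_cons, List.length_nil] at h1; omega
    obtain ⟨K, rfl⟩ : ∃ K, maxg = [K] := by
      cases maxg with
      | nil => simp at h2
      | cons K Kt =>
        cases Kt with
        | nil => exact ⟨K, rfl⟩
        | cons _ _ => exfalso; simp only [List.length_cons, List.length_nil] at h1 h2; omega
    simp [pvRenderRow, renderR, List.zipWith3]
  | cons m mt ih =>
    cases gaps with
    | nil => simp at h1
    | cons g gt =>
      cases maxg with
      | nil => simp at h2
      | cons K Kt =>
        obtain ⟨g2, gt', rfl⟩ : ∃ g2 gt', gt = g2 :: gt' := by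
          cases gt with
          | nil => simp at h1
          | cons g2 gt' => exact ⟨g2, gt', rfl⟩
        obtain ⟨K2, Kt', rfl⟩ : ∃ K2 Kt', Kt = K2 :: Kt' := by
          cases Kt with
          | nil => simp at h2
          | cons K2 Kt' => exact ⟨K2, Kt', rfl⟩
        have h1' : (g2 :: gt').length = mt.length + 1 := by simpa using h1
        have h2' : (K2 :: Kt').length = (g2 :: gt').length := by simpa using h2
        have hstep : pvRenderRow (K :: K2 :: Kt') (g :: g2 :: gt') (m :: mt)
            = (g ++ List.replicate (K - g.length) '-' ++ [m])
              ++ pvRenderRow (K2 :: Kt') (g2 :: gt') mt := by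
          simp only [pvRenderRow, List.zipWith3, List.flatten_cons,
            List.getLast?_cons_cons]
          simp [List.append_assoc]
        rw [hstep, ih (K2 :: Kt') (g2 :: gt') h1' h2']
        show _ = renderR (K :: K2 :: Kt') (g :: g2 :: gt') (m :: mt)
        rw [renderR]
        simp [List.append_assoc]

def lensOf (r : List Char) : List Nat := (tokR r).1.map List.length
def MG (rs : List (List Char)) : List Nat := maxP (rs.map lensOf)
def Brow (rs : List (List Char)) : List (List Char) :=
  rs.map (fun r => renderR (MG rs) (tokR r).1 (tokR r).2)

theorem lensOf_ne_nil (r : List Char) : lensOf r ≠ [] := by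
  rw [lensOf]
  intro h
  exact tokR_ne_nil r (List.map_eq_nil_iff.mp h)

theorem lensOf_dest (r : List Char) :
    lensOf r = ((tokR r).1.headD []).length :: ((tokR r).1.tail.map List.length) := by
  rw [lensOf]
  conv_lhs => rw [tokR_dest r]
  simp

theorem lensOf_popLower (r : List Char) :
    lensOf (pvPopLower r) = ((lensOf r).headD 0 - 1) :: (lensOf r).tail := by
  rw [lensOf, tokR_popLower]
  rw [lensOf_dest]
  simp [List.length_tail]

theorem MG_cons (r0 : List Char) (rest : List (List Char)) :
    MG (r0 :: rest)
      = (rest.foldl (fun x r => max x ((lensOf r).headD 0)) ((lensOf r0).headD 0))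
        :: maxP ((lensOf r0).tail :: rest.map (fun r => (lensOf r).tail)) := by
  obtain ⟨a, as, hl⟩ : ∃ a as, lensOf r0 = a :: as := ⟨_, _, lensOf_dest r0⟩
  rw [MG, List.map_cons, hl,
    maxP_decomp a as _ (fun l hl' => by
      obtain ⟨r, _, rfl⟩ := List.mem_map.mp hl'
      exact lensOf_ne_nil r)]
  rw [List.foldl_map, List.map_map]
  simp
  rfl

theorem MG_pop (r0 : List Char) (rest : List (List Char)) :
    MG ((r0 :: rest).map pvPopLower)
      = (rest.foldl (fun x r => max x ((lensOf r).headD 0)) ((lensOf r0).headD 0) - 1)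
        :: maxP ((lensOf r0).tail :: rest.map (fun r => (lensOf r).tail)) := by
  rw [MG, List.map_map]
  have hmap : (r0 :: rest).map (lensOf ∘ pvPopLower)
      = (r0 :: rest).map (fun r => ((lensOf r).headD 0 - 1) :: (lensOf r).tail) :=
    List.map_congr_left (fun r _ => lensOf_popLower r)
  rw [hmap, List.map_cons,
    maxP_decomp _ _ _ (fun l hl' => by
      obtain ⟨r, _, rfl⟩ := List.mem_map.mp hl'
      simp)]
  rw [List.foldl_map, List.map_map]
  simp only [List.headD_cons]
  congr 1
  exact foldl_max_sub rest (fun r => (lensOf r).headD 0) _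

theorem headLen_pos_of_lower (r : List Char) (h : pvLowerHead r = true) :
    1 ≤ (lensOf r).headD 0 := by
  rw [lensOf_dest]
  rw [gap0_of_lower r h]
  simp

theorem one_le_K (r0 : List Char) (rest : List (List Char))
    (h : ∃ r ∈ r0 :: rest, pvLowerHead r = true) :
    1 ≤ rest.foldl (fun x r => max x ((lensOf r).headD 0)) ((lensOf r0).headD 0) := by
  obtain ⟨r, hr, hlow⟩ := h
  have h1 : 1 ≤ (lensOf r).headD 0 := headLen_pos_of_lower r hlow
  rcases List.mem_cons.mp hr with rfl | hr'
  · exact le_trans h1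
      (PySem.List.le_foldl_max_nat rest (fun r => (lensOf r).headD 0) _).1
  · exact le_trans h1
      ((PySem.List.le_foldl_max_nat rest (fun r => (lensOf r).headD 0) _).2 r hr')

theorem lensOf_tail_of_not_lower (r : List Char) (hne : r ≠ []) (h : pvLowerHead r = false) :
    (lensOf r).tail = lensOf r.tail := by
  cases r with
  | nil => exact absurd rfl hne
  | cons c cs =>
    simp only [pvLowerHead] at h
    rw [lensOf, lensOf]
    simp [tokR, h]

theorem renderR_step_lower (K : Nat) (Kt : List Nat) (r : List Char) (hK : 1 ≤ K) :
    renderR (K :: Kt) (tokR r).1 (tokR r).2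
      = pvColChar r
        :: renderR ((K - 1) :: Kt) (tokR (pvPopLower r)).1 (tokR (pvPopLower r)).2 := by
  rw [tokR_popLower]
  by_cases h : pvLowerHead r = true
  · have hg := gap0_of_lower r h
    conv_lhs => rw [tokR_dest r, hg]
    rw [show (tokR r).1.headD [] = pvColChar r :: ((tokR r).1.headD []).tail from hg]
    simp only [List.tail_cons]
    have hrep : K - (pvColChar r :: ((tokR r).1.headD []).tail).length
        = (K - 1) - ((tokR r).1.headD []).tail.length := by simp; omega
    cases hms : (tokR r).2 with
    | nil => rw [renderR, renderR, hrep]; simp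
    | cons m mt => rw [renderR, renderR, hrep]; simp
  · have hb : pvLowerHead r = false := by simpa using h
    have hg := gap0_of_not_lower r hb
    conv_lhs => rw [tokR_dest r, hg]
    rw [hg, colChar_of_not_lower r hb]
    have hrep : List.replicate (K - ([] : List Char).length) '-'
        = '-' :: List.replicate ((K - 1) - ([] : List Char).length) '-' := by
      simp only [List.length_nil, Nat.sub_zero]
      rw [show K = (K - 1) + 1 by omega, List.replicate_succ]
      simp
    cases hms : (tokR r).2 with
    | nil => rw [renderR, renderR, hrep]; simp
    | cons m mt => rw [renderR, renderR, hrep]; simp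

theorem renderR_step_match (Kt : List Nat) (c : Char) (cs : List Char)
    (h : pvIsLower c = false) :
    renderR (0 :: Kt) (tokR (c :: cs)).1 (tokR (c :: cs)).2
      = c :: renderR Kt (tokR cs).1 (tokR cs).2 := by
  have ht : tokR (c :: cs) = ([] :: (tokR cs).1, c :: (tokR cs).2) := by
    simp [tokR, h]
  rw [ht]
  conv_lhs => rw [tokR_dest cs]
  conv_rhs => rw [tokR_dest cs]
  rcases (tokR cs).2 with _ | ⟨m, mt⟩ <;> simp [renderR]

theorem zip_step (f : List Char → Char) (F G : List Char → List Char) :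
    ∀ (out rs : List (List Char)), (∀ r ∈ rs, F r = f r :: G r) →
    List.zipWith (· ++ ·) (List.zipWith (fun o c => o ++ [f c]) out rs) (rs.map G)
      = List.zipWith (· ++ ·) out (rs.map F) := by
  intro out
  induction out with
  | nil => intro rs _; simp
  | cons o out ih =>
    intro rs h
    cases rs with
    | nil => simp
    | cons r rs =>
      simp only [List.map_cons, List.zipWith_cons_cons]
      rw [ih rs (fun q hq => h q (by simp [hq]))]
      rw [h r (by simp)]
      simp

theorem zipWith_append_nil (out bs : List (List Char)) (h : ∀ b ∈ bs, b = [])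
    (hl : out.length = bs.length) : List.zipWith (· ++ ·) out bs = out := by
  induction out generalizing bs with
  | nil => simp
  | cons o out ih =>
    cases bs with
    | nil => simp at hl
    | cons b bs =>
      simp only [List.zipWith_cons_cons]
      rw [h b (by simp), ih bs (fun q hq => h q (by simp [hq])) (by simpa using hl)]
      simp

theorem zipWith_nil_append {α : Type} (xs : List α) (bs : List (List Char))
    (hl : xs.length = bs.length) :
    List.zipWith (· ++ ·) (xs.map fun _ => ([] : List Char)) bs = bs := by
  induction xs generalizing bs with
  | nil => cases bs <;> simp_all
  | cons x xs ih =>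
    cases bs with
    | nil => simp at hl
    | cons b bs =>
      simp only [List.map_cons, List.zipWith_cons_cons, List.nil_append]
      rw [ih bs (by simpa using hl)]

def totalLen (rs : List (List Char)) : Nat := (rs.map List.length).sum

theorem totalLen_pop_lt (rs : List (List Char)) (h : rs.any pvLowerHead = true) :
    totalLen (rs.map pvPopLower) < totalLen rs := by
  induction rs with
  | nil => simp at h
  | cons r rs ih =>
    simp only [List.any_cons, Bool.or_eq_true] at h
    rcases h with h | h
    · have hr : (pvPopLower r).length < r.length := by
        cases r with
        | nil => simp [pvLowerHead] at h
        | cons c cs =>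
          simp only [pvLowerHead] at h
          simp [pvPopLower, pvLowerHead, h]
      have hle : ∀ q : List Char, (pvPopLower q).length ≤ q.length := by
        intro q
        rw [pvPopLower]
        split
        · simp [List.length_tail]
        · exact le_rfl
      have : totalLen (rs.map pvPopLower) ≤ totalLen rs := by
        simp only [totalLen, List.map_map]
        apply List.sum_le_sum
        intro q hq
        simp only [Function.comp_apply]
        exact hle q
      simp only [totalLen, List.map_cons, List.sum_cons] at *
      omega
    · have := ih h
      have hle : (pvPopLower r).length ≤ r.length := by
        rw [pvPopLower]; split
        · simp [List.length_tail]
        · exact le_rfl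
      simp only [totalLen, List.map_cons, List.sum_cons] at *
      omega

theorem totalLen_tail_lt (rs : List (List Char)) (hne : rs ≠ [])
    (hall : ∀ r ∈ rs, r ≠ []) :
    totalLen (rs.map List.tail) < totalLen rs := by
  induction rs with
  | nil => exact absurd rfl hne
  | cons r rs ih =>
    have hr : r ≠ [] := hall r (by simp)
    have hlt : r.tail.length < r.length := by
      cases r with
      | nil => exact absurd rfl hr
      | cons c cs => simp
    cases rs with
    | nil => simpa [totalLen] using hlt
    | cons q qs =>
      have := ih (by simp) (fun p hp => hall p (List.mem_cons_of_mem _ hp))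
      simp only [totalLen, List.map_cons, List.sum_cons] at *
      omega


theorem foldl_zipWith_nil (ls : List (List Nat)) :
    ls.foldl (fun acc x => List.zipWith max acc x) [] = [] := by
  induction ls with
  | nil => rfl
  | cons l ls ih => simpa using ih

theorem lensOf_nil : lensOf [] = [0] := by simp [lensOf, tokR]

theorem lensOf_cons_not_lower (c : Char) (cs : List Char) (h : pvIsLower c = false) :
    lensOf (c :: cs) = 0 :: lensOf cs := by
  rw [lensOf, lensOf]
  simp [tokR, h]

theorem lensOf_length (r : List Char) :
    (lensOf r).length = r.countP (fun c => !pvIsLower c) + 1 := by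
  rw [lensOf, List.length_map, tokR_len, tokR_cnt]

theorem foldl_zipWith_length (n : Nat) (ls : List (List Nat))
    (h : ∀ l ∈ ls, l.length = n) :
    ∀ l0 : List Nat, l0.length = n →
      (ls.foldl (fun acc x => List.zipWith max acc x) l0).length = n := by
  induction ls with
  | nil => intro l0 h0; simpa using h0
  | cons l ls ih =>
    intro l0 h0
    simp only [List.foldl_cons]
    exact ih (fun q hq => h q (by simp [hq]))
      _ (by rw [List.length_zipWith, h0, h l (by simp)]; omega)

theorem MG_length (rs : List (List Char)) (n : Nat) (hne : rs ≠ [])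
    (h : ∀ r ∈ rs, (lensOf r).length = n) : (MG rs).length = n := by
  cases rs with
  | nil => exact absurd rfl hne
  | cons r0 rest =>
    rw [MG, List.map_cons]
    exact foldl_zipWith_length n (rest.map lensOf)
      (fun l hl => by obtain ⟨r, hr, rfl⟩ := List.mem_map.mp hl
                      exact h r (by simp [hr]))
      (lensOf r0) (h r0 (by simp))

theorem zipWith_max_replicate_zero (l : List Nat) :
    List.zipWith max (List.replicate l.length 0) l = l := by
  induction l with
  | nil => rfl
  | cons x l ih => simpa [List.replicate_succ] using ih

def eqCnt (rs : List (List Char)) : Prop :=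
  ∀ r ∈ rs, ∀ q ∈ rs,
    r.countP (fun c => !pvIsLower c) = q.countP (fun c => !pvIsLower c)

theorem a3mLoop_eq (fuel : Nat) : ∀ (rs out : List (List Char)),
    totalLen rs < fuel → eqCnt rs → out.length = rs.length →
    a3mLoop fuel rs out = List.zipWith (· ++ ·) out (Brow rs) := by
  induction fuel with
  | zero => intro rs out h _ _; exact absurd h (Nat.not_lt_zero _)
  | succ fuel ih =>
    intro rs out hfuel hcnt hlen
    by_cases hne : rs.any (fun c => !c.isEmpty) = true
    · rw [a3mLoop, if_pos hne]
      by_cases hlow : rs.any pvLowerHead = true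
      · rw [if_pos hlow]
        cases rs with
        | nil => simp at hne
        | cons r0 rest =>
          have hK : 1 ≤ rest.foldl (fun x r => max x ((lensOf r).headD 0))
              ((lensOf r0).headD 0) :=
            one_le_K r0 rest (by
              obtain ⟨r, hr, hl⟩ := List.any_eq_true.mp hlow
              exact ⟨r, hr, hl⟩)
          have hstep : ∀ r ∈ r0 :: rest,
              renderR (MG (r0 :: rest)) (tokR r).1 (tokR r).2
                = pvColChar r :: renderR (MG ((r0 :: rest).map pvPopLower))
                    (tokR (pvPopLower r)).1 (tokR (pvPopLower r)).2 := by
            intro r _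
            rw [MG_cons r0 rest, MG_pop r0 rest]
            exact renderR_step_lower _ _ r hK
          have hcnt' : eqCnt ((r0 :: rest).map pvPopLower) := by
            intro p hp q hq
            obtain ⟨p', hp', rfl⟩ := List.mem_map.mp hp
            obtain ⟨q', hq', rfl⟩ := List.mem_map.mp hq
            rw [cnt_popLower, cnt_popLower]
            exact hcnt p' hp' q' hq'
          have hlen' : (List.zipWith (fun o c => o ++ [pvColChar c]) out (r0 :: rest)).length
              = ((r0 :: rest).map pvPopLower).length := by
            rw [List.length_zipWith, hlen, List.length_map]
            omega
          rw [ih _ _ (by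
              have := totalLen_pop_lt (r0 :: rest) hlow
              omega) hcnt' hlen']
          have hz := zip_step pvColChar
            (fun r => renderR (MG (r0 :: rest)) (tokR r).1 (tokR r).2)
            (fun r => renderR (MG ((r0 :: rest).map pvPopLower))
              (tokR (pvPopLower r)).1 (tokR (pvPopLower r)).2)
            out (r0 :: rest) hstep
          simp only [Brow, List.map_map]
          simpa [Function.comp] using hz
      · rw [if_neg hlow]
        obtain ⟨r1, hr1, hr1ne⟩ : ∃ r ∈ rs, r ≠ [] := by
          obtain ⟨r, hr, h⟩ := List.any_eq_true.mp hne
          exact ⟨r, hr, by simpa using h⟩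
        have hlowf : ∀ r ∈ rs, pvLowerHead r = false := by
          intro r hr
          have h' : rs.any pvLowerHead = false := by simpa using hlow
          simpa using List.any_eq_false.mp h' r hr
        have hcnt1 : 1 ≤ r1.countP (fun c => !pvIsLower c) := by
          cases r1 with
          | nil => exact absurd rfl hr1ne
          | cons c cs =>
            have hc := hlowf _ hr1
            simp only [pvLowerHead] at hc
            simp [hc]
        have hallne : ∀ r ∈ rs, r ≠ [] := by
          intro r hr h0
          have h1 := hcnt r hr r1 hr1
          rw [h0] at h1
          simp only [List.countP_nil] at h1
          omega
        have hemp : ¬ rs.any List.isEmpty = true := by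
          simp only [List.any_eq_true, not_exists]
          intro r
          rintro ⟨hr, he⟩
          exact hallne r hr (List.isEmpty_iff.mp he)
        rw [if_neg hemp]
        cases rs with
        | nil => simp at hne
        | cons r0 rest =>
          have hz : ∀ r ∈ r0 :: rest, (lensOf r).headD 0 = 0 := by
            intro r hr
            obtain ⟨c, cs, rfl⟩ : ∃ c cs, r = c :: cs := by
              cases r with
              | nil => exact absurd rfl (hallne _ hr)
              | cons c cs => exact ⟨c, cs, rfl⟩
            have hc : pvIsLower c = false := by
              have := hlowf _ hr
              simpa [pvLowerHead] using this
            rw [lensOf_cons_not_lower c cs hc]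
            rfl
          have hMG : MG (r0 :: rest) = 0 :: MG ((r0 :: rest).map List.tail) := by
            rw [MG_cons]
            congr 1
            · rw [hz r0 (by simp)]
              exact foldl_max_zero rest _ (fun r hr => hz r (by simp [hr]))
            · rw [MG, List.map_map, List.map_cons,
                lensOf_tail_of_not_lower r0 (hallne _ (by simp)) (hlowf _ (by simp)),
                List.map_congr_left (fun r hr =>
                  lensOf_tail_of_not_lower r (hallne r (by simp [hr])) (hlowf r (by simp [hr])))]
              rfl
          have hstep : ∀ r ∈ r0 :: rest,
              renderR (MG (r0 :: rest)) (tokR r).1 (tokR r).2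
                = r.headD '-' :: renderR (MG ((r0 :: rest).map List.tail))
                    (tokR r.tail).1 (tokR r.tail).2 := by
            intro r hr
            obtain ⟨c, cs, rfl⟩ : ∃ c cs, r = c :: cs := by
              cases r with
              | nil => exact absurd rfl (hallne _ hr)
              | cons c cs => exact ⟨c, cs, rfl⟩
            have hc : pvIsLower c = false := by
              have := hlowf _ hr
              simpa [pvLowerHead] using this
            rw [hMG]
            simpa using renderR_step_match _ c cs hc
          have hcnt' : eqCnt ((r0 :: rest).map List.tail) := by
            have e : ∀ r ∈ r0 :: rest,
                r.tail.countP (fun c => !pvIsLower c) + 1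
                  = r.countP (fun c => !pvIsLower c) := by
              intro r hr
              obtain ⟨c, cs, rfl⟩ : ∃ c cs, r = c :: cs := by
                cases r with
                | nil => exact absurd rfl (hallne _ hr)
                | cons c cs => exact ⟨c, cs, rfl⟩
              have hc : pvIsLower c = false := by
                have := hlowf _ hr
                simpa [pvLowerHead] using this
              simp [hc]
            intro p hp q hq
            obtain ⟨p', hp', rfl⟩ := List.mem_map.mp hp
            obtain ⟨q', hq', rfl⟩ := List.mem_map.mp hq
            have h1 := hcnt p' hp' q' hq'
            have e1 := e p' hp'
            have e2 := e q' hq'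
            omega
          have hlen' : (List.zipWith (fun o c => o ++ [c.headD '-']) out (r0 :: rest)).length
              = ((r0 :: rest).map List.tail).length := by
            rw [List.length_zipWith, hlen, List.length_map]
            omega
          rw [ih _ _ (by
              have := totalLen_tail_lt (r0 :: rest) (by simp) hallne
              omega) hcnt' hlen']
          have hzs := zip_step (fun c => c.headD '-')
            (fun r => renderR (MG (r0 :: rest)) (tokR r).1 (tokR r).2)
            (fun r => renderR (MG ((r0 :: rest).map List.tail))
              (tokR r.tail).1 (tokR r.tail).2)
            out (r0 :: rest) hstep
          simp only [Brow, List.map_map]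
          simpa [Function.comp] using hzs
    · rw [a3mLoop, if_neg hne]
      have hall : ∀ r ∈ rs, r = [] := by
        intro r hr
        have h' : rs.any (fun c => !c.isEmpty) = false := by simpa using hne
        have := List.any_eq_false.mp h' r hr
        simpa [List.isEmpty_iff] using this
      have hb : ∀ b ∈ Brow rs, b = [] := by
        intro b hbm
        obtain ⟨r, hr, rfl⟩ := List.mem_map.mp hbm
        cases rs with
        | nil => simp at hr
        | cons r0 rest =>
          have hMG0 : MG (r0 :: rest) = [0] := by
            rw [MG_cons]
            have hl0 : ∀ q ∈ r0 :: rest, lensOf q = [0] := by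
              intro q hq
              rw [hall q hq, lensOf_nil]
            congr 1
            · rw [hl0 r0 (by simp)]
              apply foldl_max_zero
              intro q hq
              rw [hl0 q (by simp [hq])]
              rfl
            · rw [hl0 r0 (by simp)]
              show maxP ([] :: _) = []
              exact foldl_zipWith_nil _
          rw [hall r hr, hMG0]
          simp [tokR, renderR]
      exact (zipWith_append_nil out (Brow rs) hb
        (by rw [hlen, Brow, List.length_map])).symm


theorem maxg_eq_MG (r0 : List Char) (rest : List (List Char)) :
    ((r0 :: rest).map tokR).foldl (fun mg row => pvMaxStep mg row.1)
      (List.replicate (((r0 :: rest).map tokR).headD ([[]], [])).1.length 0)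
      = MG (r0 :: rest) := by
  simp only [List.map_cons, List.headD_cons, List.foldl_cons]
  have h0 : pvMaxStep (List.replicate (tokR r0).1.length 0) (tokR r0).1 = lensOf r0 := by
    rw [pvMaxStep,
      show List.zipWith (fun a g => max a (g.length))
          (List.replicate (tokR r0).1.length 0) (tokR r0).1
        = List.zipWith max (List.replicate (tokR r0).1.length 0)
            ((tokR r0).1.map List.length) from List.zipWith_map_right.symm,
      show (tokR r0).1.length = ((tokR r0).1.map List.length).length by simp]
    exact zipWith_max_replicate_zero _
  rw [h0, List.foldl_map, MG, List.map_cons]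
  show _ = maxP (lensOf r0 :: rest.map lensOf)
  rw [show maxP (lensOf r0 :: rest.map lensOf)
      = (rest.map lensOf).foldl (fun acc x => List.zipWith max acc x) (lensOf r0) from rfl,
    List.foldl_map]
  have hfun : (fun (mg : List Nat) (r : List Char) => pvMaxStep mg (tokR r).1)
      = fun mg r => List.zipWith max mg (lensOf r) := by
    funext mg r
    rw [pvMaxStep, lensOf]
    exact List.zipWith_map_right.symm
  rw [hfun]

-- ===== VERDICT (by name: the statement is the Claim_ definition above) =====
theorem a3m_to_sto_list_spec : Claim_equal_a3m_to_sto_list := by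
  intro a3m_seqs _ hpre
  show a3m_to_sto_list a3m_seqs = a3m_to_sto_list_alt a3m_seqs
  cases a3m_seqs with
  | nil => rfl
  | cons s0 ss =>
    have hcnt : eqCnt ((s0 :: ss).map String.toList) := by
      intro p hp q hq
      obtain ⟨s, hs, rfl⟩ := List.mem_map.mp hp
      obtain ⟨t, ht, rfl⟩ := List.mem_map.mp hq
      have h1 := hpre s hs
      have h2 := hpre t ht
      simp only [pvCnt, List.headD_cons] at h1 h2
      rw [h1, h2]
    have hrows : (s0 :: ss).map (fun s => pvTok s.toList)
        = ((s0 :: ss).map String.toList).map tokR := by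
      rw [List.map_map]
      exact List.map_congr_left (fun s _ => tok_eq s.toList)
    have hguard : (((s0 :: ss).map String.toList).map tokR).any
        (fun row => row.2.length != ((((s0 :: ss).map String.toList).map tokR).headD ([[]], [])).2.length) = false := by
      apply List.any_eq_false.mpr
      intro row hrow
      obtain ⟨r, hr, rfl⟩ := List.mem_map.mp hrow
      simp only [List.map_cons, List.headD_cons, bne_iff_ne, ne_eq, not_not]
      rw [tokR_cnt, tokR_cnt]
      exact hcnt r hr s0.toList (by simp)
    rw [a3m_to_sto_list, a3m_to_sto_list_alt]
    simp only [List.isEmpty_cons, Bool.false_eq_true, if_false, hrows, hguard]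
    rw [show ((s0 :: ss).map String.toList) = s0.toList :: ss.map String.toList from by simp] at hcnt ⊢
    rw [a3mLoop_eq _ _ _ (by rw [show ((s0.toList :: ss.map String.toList).map List.length).sum = totalLen (s0.toList :: ss.map String.toList) from rfl]; omega) hcnt (by simp),
      zipWith_nil_append _ _ (by simp [Brow]),
      maxg_eq_MG, Brow, List.map_map, List.map_map]
    apply List.map_congr_left
    intro r hr
    have h1 : (tokR r).1.length = (tokR r).2.length + 1 := tokR_len r
    have h2 : (MG (s0.toList :: ss.map String.toList)).length = (tokR r).1.length := by
      rw [MG_length (s0.toList :: ss.map String.toList) ((lensOf r).length) (by simp)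
        (fun q hq => by rw [lensOf_length, lensOf_length, hcnt q hq r hr])]
      rw [lensOf, List.length_map]
    exact (congrArg String.ofList (renderRow_eq_renderR _ _ _ h1 h2)).symm
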